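-- pv_equiv track=rewrite | github.com/jihwankim255/Coding_Test | 프로그래머스/1926BFS.py | solution
-- ===== SOURCE A (Python) =====
-- def solution(map):
--     row = len(map)
--     col = len(map[0])
--     chk = [[False] * col for _ in range(row)]
--     count = 0
--     maximum = 0
--
--     for i in range(row):
--         for j in range(col):
--             if map[i][j] == 1 and chk[i][j] == False:
--                 chk[i][j] = True
--                 count += 1
--                 maximum = max(maximum, bfs(i, j, map, chk))
--
--
--     return count, maximum
--
-- dx = [0,1,0,-1]
--
-- dy = [1,0,-1,0]
--
-- def bfs(x, y, map, chk):
--     result = 1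
--     queue = [(x, y)]
--
--     while queue:
--         ex, ey = queue.pop()
--         for k in range(4):
--             nx = ex + dx[k]
--             ny = ey + dy[k]
--             if 0 <= nx < len(map) and 0 <= ny < len(map[0]) and map[nx][ny] == 1 and chk[nx][ny] == False:
--                 result += 1
--                 chk[nx][ny] = True
--                 queue.append((nx, ny))
--     return result
-- ===== SOURCE B (Python) =====
-- def solution(map):
--     col = len(map[0])
--     rows = len(map)
--     ones = [(i, j) for i in range(rows) for j in range(col) if map[i][j] == 1]
--     label = {c: c[0] * col + c[1] for c in ones}
--     for _ in range(rows * col + 1):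
--         new = {(i, j): min([label[(i, j)]] +
--                            [label[n] for n in ((i, j + 1), (i + 1, j), (i, j - 1), (i - 1, j))
--                             if n in label])
--                for (i, j) in ones}
--         if new == label:
--             break
--         label = new
--     values = list(label.values())
--     roots = set(values)
--     return len(roots), max((values.count(r) for r in roots), default=0)
-- ===== Notes on version B (the rewrite author's own statement) =====
-- stated objective: alternative
-- what changed: Replaces the stack-based flood fill with a synchronous min-label-propagation connected-component algorithm: every 1-cell starts with label i*col+j, labels are repeatedly replaced by the min over the cell and its 4-neighbors until a fixpoint, then count = number of distinct labels and maximum = largest label frequency.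
import Mathlib
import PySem

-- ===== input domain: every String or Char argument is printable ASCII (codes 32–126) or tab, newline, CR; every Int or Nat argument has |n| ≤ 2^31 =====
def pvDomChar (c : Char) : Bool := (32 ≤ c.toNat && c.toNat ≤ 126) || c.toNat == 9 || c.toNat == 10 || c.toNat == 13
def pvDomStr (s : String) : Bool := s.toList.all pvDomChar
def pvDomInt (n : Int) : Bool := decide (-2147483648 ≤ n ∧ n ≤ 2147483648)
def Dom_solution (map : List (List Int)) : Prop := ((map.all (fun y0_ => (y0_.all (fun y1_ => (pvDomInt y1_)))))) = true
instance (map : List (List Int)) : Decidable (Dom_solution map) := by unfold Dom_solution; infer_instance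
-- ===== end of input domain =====

-- B replaces A's stack-based flood fill by a different algorithm: synchronous min-label
-- propagation (each 1-cell starts with label i*col+j; labels are repeatedly replaced by the
-- minimum over the cell and its 4-neighbours until a fixpoint; islands are the label classes).
-- Objective: alternative (B is not faster; it trades the stack for a purely local fixpoint rule).

-- ===== PORT A =====
-- map[i][j] read with default 0: inside Pre_solution every actual access is in range
def pyCell (map : List (List Int)) (i j : Int) : Int :=
  PySem.List.pyGetD (PySem.List.pyGetD map i []) j 0

def chkGet (chk : List (List Bool)) (i j : Int) : Bool :=
  PySem.List.pyGetD (PySem.List.pyGetD chk i []) j false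

-- chk[i][j] = True; callers guard 0 ≤ i < len(chk), 0 ≤ j < len(chk[i]), where .toNat is exact
def chkSet (chk : List (List Bool)) (i j : Int) : List (List Bool) :=
  chk.set i.toNat ((chk.getD i.toNat []).set j.toNat true)

def dxA : List Int := [0, 1, 0, -1]
def dyA : List Int := [1, 0, -1, 0]

def bfsA (map : List (List Int)) (fuel : Nat) (chk : List (List Bool))
    (queue : List (Int × Int)) (result : Int) : List (List Bool) × Int :=
  match fuel, queue with
  | 0, _ => (chk, result)
  | _ + 1, [] => (chk, result)
  | f + 1, (ex, ey) :: rest =>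
    let s := (PySem.List.pyRange 0 4).foldl
      (fun (s : List (List Bool) × List (Int × Int) × Int) k =>
        let nx := ex + PySem.List.pyGetD dxA k 0
        let ny := ey + PySem.List.pyGetD dyA k 0
        if 0 ≤ nx ∧ nx < (map.length : Int) ∧ 0 ≤ ny ∧ ny < ((PySem.List.pyGetD map 0 []).length : Int)
            ∧ pyCell map nx ny = 1 ∧ chkGet s.1 nx ny = false then
          (chkSet s.1 nx ny, (nx, ny) :: s.2.1, s.2.2 + 1)
        else s) (chk, rest, result)
    bfsA map f s.1 s.2.1 s.2.2

def solution (map : List (List Int)) : Int × Int :=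
  let row := map.length
  let col := (PySem.List.pyGetD map 0 []).length
  let chk0 : List (List Bool) := List.replicate row (List.replicate col false)
  let fin := (PySem.List.pyRange 0 (row : Int)).foldl (fun s i =>
    (PySem.List.pyRange 0 (col : Int)).foldl
      (fun (s : List (List Bool) × Int × Int) j =>
        if pyCell map i j = 1 ∧ chkGet s.1 i j = false then
          let chk1 := chkSet s.1 i j
          let r := bfsA map (row * col + 1) chk1 [(i, j)] 1
          (r.1, s.2.1 + 1, max s.2.2 r.2)
        else s) s) (chk0, (0 : Int), (0 : Int))
  (fin.2.1, fin.2.2)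

-- ===== PORT B =====
-- neighbour candidates ((i, j+1), (i+1, j), (i, j-1), (i-1, j)) of Source B
def candsB (c : Int × Int) : List (Int × Int) :=
  [(c.1, c.2 + 1), (c.1 + 1, c.2), (c.1, c.2 - 1), (c.1 - 1, c.2)]

-- [(i, j) for i in range(rows) for j in range(col) if map[i][j] == 1]
def onesB (map : List (List Int)) : List (Int × Int) :=
  (PySem.List.pyRange 0 (map.length : Int)).flatMap (fun i =>
    ((PySem.List.pyRange 0 ((PySem.List.pyGetD map 0 []).length : Int)).filter
      (fun j => pyCell map i j == 1)).map (fun j => (i, j)))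

-- Python min() of a list; every call site passes a nonempty list, so the default is never used
def pyMinB (l : List Int) : Int := (PySem.List.min? l (fun x => x)).getD 0

-- one synchronous update: {c: min([label[c]] + [label[n] for n in cands(c) if n in label]) for c in ones}
def stepB (label : PySem.Dict (Int × Int) Int) (ones : List (Int × Int)) :
    PySem.Dict (Int × Int) Int :=
  ones.foldl (fun d c =>
    d.insert c (pyMinB (label.getD c 0 ::
      ((candsB c).filter (fun n => label.contains n)).map (fun n => label.getD n 0))))
    PySem.Dict.empty

-- the bounded `for … : new = …; if new == label: break; label = new` loop.
-- Python's dict == ignores insertion order, but every dict compared here lists its keys in the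
-- identical order `ones`, so structural equality is exact.
def propB (ones : List (Int × Int)) (fuel : Nat) (label : PySem.Dict (Int × Int) Int) :
    PySem.Dict (Int × Int) Int :=
  match fuel with
  | 0 => label
  | f + 1 =>
    let new := stepB label ones
    if new = label then label else propB ones f new

def solution_alt (map : List (List Int)) : Int × Int :=
  let col := (PySem.List.pyGetD map 0 []).length
  let rows := map.length
  let ones := onesB map
  -- label[c] is read with default 0; every key looked up is in the dict, so the default is unused
  let label0 := ones.foldl (fun d c => d.insert c (c.1 * (col : Int) + c.2)) PySem.Dict.empty
  let label := propB ones (rows * col + 1) label0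
  let values := label.values
  let roots : PySem.Set Int := PySem.Set.ofList values
  ((roots.length : Int),
   PySem.List.maxD (roots.map (fun r => (values.count r : Int))) (fun x => x) 0)

-- ===== PRECONDITION & SPEC =====
-- Pre_ excludes exactly the inputs where Python A raises IndexError: the empty grid (A reads
-- map[0]) and grids with a row shorter than the first row (A reads map[i][j] for every j < len(map[0])).
def Pre_solution (map : List (List Int)) : Prop :=
  map ≠ [] ∧ ∀ r ∈ map, (PySem.List.pyGetD map 0 []).length ≤ r.length

instance (map : List (List Int)) : Decidable (Pre_solution map) := by
  unfold Pre_solution; infer_instance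

def pvWitness_solution : List (List Int) := [[1, 1, 0], [0, 0, 1]]

def Spec_solution (map : List (List Int)) (out : Int × Int) : Prop := out = solution_alt map
instance (map : List (List Int)) (out : Int × Int) : Decidable (Spec_solution map out) := by unfold Spec_solution; infer_instance

-- ===== CLAIM (what is proved, stated in full; the proofs are below) =====
def Claim_equal_solution : Prop := ∀ (map : List (List Int)), Dom_solution map → Pre_solution map → Spec_solution map (solution map)

-- ===== LEMMAS AND PROOFS =====

-- ---------- A-side set-flood helper (proof layer): the flood fill on a set of coordinates ----------
def floodS (map : List (List Int)) (rows col : Int) (fuel : Nat)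
    (visited : PySem.Set (Int × Int)) (stack : List (Int × Int)) : PySem.Set (Int × Int) :=
  match fuel, stack with
  | 0, _ => visited
  | _ + 1, [] => visited
  | f + 1, (x, y) :: rest =>
    let s := [(x, y + 1), (x + 1, y), (x, y - 1), (x - 1, y)].foldl
      (fun (s : PySem.Set (Int × Int) × List (Int × Int)) c =>
        if 0 ≤ c.1 ∧ c.1 < rows ∧ 0 ≤ c.2 ∧ c.2 < col ∧ pyCell map c.1 c.2 = 1 ∧ c ∉ s.1 then
          (PySem.Set.add s.1 c, c :: s.2)
        else s) (visited, rest)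
    floodS map rows col f s.1 s.2

def solutionSet (map : List (List Int)) : Int × Int :=
  let col := (PySem.List.pyGetD map 0 []).length
  let rows := map.length
  let fin := (PySem.List.enumerate map).foldl (fun s p =>
    (PySem.List.pyRange 0 (col : Int)).foldl
      (fun (s : PySem.Set (Int × Int) × List Int) j =>
        if PySem.List.pyGetD p.2 j 0 = 1 ∧ (p.1, j) ∉ s.1 then
          let start := (s.1.length : Int)
          let vis := floodS map (rows : Int) (col : Int) (rows * col + 1)
            (PySem.Set.add s.1 (p.1, j)) [(p.1, j)]
          (vis, s.2 ++ [(vis.length : Int) - start])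
        else s) s) (PySem.Set.empty, ([] : List Int))
  ((fin.2.length : Int), PySem.List.maxD fin.2 (fun x => x) 0)

-- in-range coordinates of the grid
def InR (map : List (List Int)) (p : Int × Int) : Prop :=
  0 ≤ p.1 ∧ p.1 < (map.length : Int) ∧ 0 ≤ p.2 ∧ p.2 < ((PySem.List.pyGetD map 0 []).length : Int)

-- the visited matrix keeps the grid's dimensions
def Shape (map : List (List Int)) (chk : List (List Bool)) : Prop :=
  chk.length = map.length ∧ ∀ r ∈ chk, r.length = (PySem.List.pyGetD map 0 []).length

-- data-representation invariant: chk is the characteristic matrix of the visited set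
def CInv (map : List (List Int)) (chk : List (List Bool)) (vis : List (Int × Int)) : Prop :=
  Shape map chk ∧ (∀ p ∈ vis, InR map p) ∧
    ∀ p : Int × Int, InR map p → (chkGet chk p.1 p.2 = true ↔ p ∈ vis)

-- A's and the set version's flood-fill loop bodies, named for the simulation lemmas
def gA (map : List (List Int)) (s : List (List Bool) × List (Int × Int) × Int)
    (c : Int × Int) : List (List Bool) × List (Int × Int) × Int :=
  if 0 ≤ c.1 ∧ c.1 < (map.length : Int) ∧ 0 ≤ c.2 ∧ c.2 < ((PySem.List.pyGetD map 0 []).length : Int)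
      ∧ pyCell map c.1 c.2 = 1 ∧ chkGet s.1 c.1 c.2 = false then
    (chkSet s.1 c.1 c.2, c :: s.2.1, s.2.2 + 1)
  else s

def gS (map : List (List Int)) (rows col : Int) (s : PySem.Set (Int × Int) × List (Int × Int))
    (c : Int × Int) : PySem.Set (Int × Int) × List (Int × Int) :=
  if 0 ≤ c.1 ∧ c.1 < rows ∧ 0 ≤ c.2 ∧ c.2 < col ∧ pyCell map c.1 c.2 = 1 ∧ c ∉ s.1 then
    (PySem.Set.add s.1 c, c :: s.2)
  else s

-- relation maintained across the paired neighbor steps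
def StepRel (map : List (List Int)) (vis0 : List (Int × Int)) (res0 : Int)
    (a : List (List Bool) × List (Int × Int) × Int)
    (b : List (Int × Int) × List (Int × Int)) : Prop :=
  CInv map a.1 b.1 ∧ a.2.1 = b.2 ∧ a.2.2 = res0 + ((b.1.length : Int) - (vis0.length : Int)) ∧
    vis0.length ≤ b.1.length


lemma getD_set_eq {α : Type} (l : List α) (i j : Nat) (a d : α) (hi : i < l.length) :
    (l.set i a).getD j d = if i = j then a else l.getD j d := by
  by_cases h : i = j
  · subst h; rw [List.getD_eq_getElem?_getD, List.getElem?_set_self hi]; simp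
  · rw [List.getD_eq_getElem?_getD, List.getElem?_set_ne h, ← List.getD_eq_getElem?_getD, if_neg h]

lemma chkGet_eq (chk : List (List Bool)) {i j : Int} (hi : 0 ≤ i) (hj : 0 ≤ j) :
    chkGet chk i j = (chk.getD i.toNat []).getD j.toNat false := by
  rw [chkGet, PySem.List.pyGetD_of_nonneg _ _ hi, PySem.List.pyGetD_of_nonneg _ _ hj]

lemma shape_chkSet {map : List (List Int)} {chk : List (List Bool)} (hs : Shape map chk)
    {c : Int × Int} (hc : InR map c) : Shape map (chkSet chk c.1 c.2) := by
  obtain ⟨h1, h2⟩ := hs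
  obtain ⟨hc1, hc2, hc3, hc4⟩ := hc
  have hlt : c.1.toNat < chk.length := by omega
  constructor
  · simp [chkSet, h1]
  · intro r hr
    rcases List.mem_or_eq_of_mem_set hr with h | h
    · exact h2 r h
    · subst h
      rw [List.length_set]
      exact h2 _ (by
        rw [List.getD_eq_getElem?_getD, List.getElem?_eq_getElem hlt, Option.getD_some]
        exact List.getElem_mem hlt)

lemma chkGet_chkSet {map : List (List Int)} {chk : List (List Bool)} (hs : Shape map chk)
    {c p : Int × Int} (hc : InR map c) (hp : InR map p) :
    chkGet (chkSet chk c.1 c.2) p.1 p.2 = (if p = c then true else chkGet chk p.1 p.2) := by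
  obtain ⟨hl, hrow⟩ := hs
  obtain ⟨hc1, hc2, hc3, hc4⟩ := hc
  obtain ⟨hp1, hp2, hp3, hp4⟩ := hp
  have hclt : c.1.toNat < chk.length := by omega
  have hrowc : (chk.getD c.1.toNat []).length = (PySem.List.pyGetD map 0 []).length := by
    rw [List.getD_eq_getElem?_getD, List.getElem?_eq_getElem hclt]
    exact hrow _ (by simp)
  rw [chkGet_eq _ hp1 hp3, chkGet_eq _ hp1 hp3, chkSet,
    getD_set_eq _ _ _ _ _ hclt]
  by_cases h1 : c.1.toNat = p.1.toNat
  · rw [if_pos h1, getD_set_eq _ _ _ _ _ (by omega)]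
    by_cases h2 : c.2.toNat = p.2.toNat
    · have hpc : p = c := by
        have e1 : p.1 = c.1 := by omega
        have e2 : p.2 = c.2 := by omega
        obtain ⟨pa, pb⟩ := p; obtain ⟨ca, cb⟩ := c
        simp_all
      rw [if_pos h2, if_pos hpc]
    · have hpc : p ≠ c := by
        intro h; subst h; omega
      rw [if_neg h2, if_neg hpc, ← h1]
  · have hpc : p ≠ c := by
      intro h; subst h; omega
    rw [if_neg h1, if_neg hpc]

lemma length_set_add {s : PySem.Set (Int × Int)} {c : Int × Int} (h : c ∉ s) :
    (PySem.Set.add s c).length = s.length + 1 := by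
  simp [PySem.Set.add, PySem.Set.contains, h]

lemma step_sim (map : List (List Int)) (vis0 : List (Int × Int)) (res0 : Int)
    (a : List (List Bool) × List (Int × Int) × Int) (b : List (Int × Int) × List (Int × Int))
    (c : Int × Int) (h : StepRel map vis0 res0 a b) :
    StepRel map vis0 res0 (gA map a c)
      (gS map (map.length : Int) ((PySem.List.pyGetD map 0 []).length : Int) b c) := by
  obtain ⟨⟨hsh, hin, hrel⟩, hq, hres, hmono⟩ := h
  by_cases hbc : 0 ≤ c.1 ∧ c.1 < (map.length : Int) ∧ 0 ≤ c.2 ∧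
      c.2 < ((PySem.List.pyGetD map 0 []).length : Int) ∧ pyCell map c.1 c.2 = 1
  · have hcInR : InR map c := ⟨hbc.1, hbc.2.1, hbc.2.2.1, hbc.2.2.2.1⟩
    by_cases hmem : c ∈ b.1
    · have hchk : chkGet a.1 c.1 c.2 = true := (hrel c hcInR).2 hmem
      have gAeq : gA map a c = a := by
        rw [gA, if_neg]; rintro ⟨-, -, -, -, -, hfalse⟩; rw [hchk] at hfalse; cases hfalse
      have gSeq : gS map (map.length : Int) ((PySem.List.pyGetD map 0 []).length : Int) b c = b := by
        rw [gS, if_neg]; rintro ⟨-, -, -, -, -, hnot⟩; exact hnot hmem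
      rw [gAeq, gSeq]; exact ⟨⟨hsh, hin, hrel⟩, hq, hres, hmono⟩
    · have hchk : chkGet a.1 c.1 c.2 = false := by
        rcases Bool.eq_false_or_eq_true (chkGet a.1 c.1 c.2) with h | h
        · exact absurd ((hrel c hcInR).1 h) hmem
        · exact h
      have gAeq : gA map a c = (chkSet a.1 c.1 c.2, c :: a.2.1, a.2.2 + 1) := by
        rw [gA, if_pos ⟨hbc.1, hbc.2.1, hbc.2.2.1, hbc.2.2.2.1, hbc.2.2.2.2, hchk⟩]
      have gSeq : gS map (map.length : Int) ((PySem.List.pyGetD map 0 []).length : Int) b c =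
          (PySem.Set.add b.1 c, c :: b.2) := by
        rw [gS, if_pos ⟨hbc.1, hbc.2.1, hbc.2.2.1, hbc.2.2.2.1, hbc.2.2.2.2, hmem⟩]
      rw [gAeq, gSeq]
      refine ⟨⟨shape_chkSet hsh hcInR, ?_, ?_⟩, by simp [hq], ?_, ?_⟩
      · intro p hp
        rcases (PySem.Set.mem_add b.1 c p).1 hp with h | h
        · exact hin p h
        · subst h; exact hcInR
      · intro p hpInR
        rw [chkGet_chkSet hsh hcInR hpInR]
        by_cases hpc : p = c
        · simp [hpc, PySem.Set.mem_add]
        · simp only [if_neg hpc]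
          rw [hrel p hpInR, PySem.Set.mem_add]
          simp [hpc]
      · simp only []
        rw [length_set_add hmem]
        push_cast
        omega
      · simp only []
        rw [length_set_add hmem]
        omega
  · have gAeq : gA map a c = a := by
      rw [gA, if_neg]
      rintro ⟨x1, x2, x3, x4, x5, -⟩; exact hbc ⟨x1, x2, x3, x4, x5⟩
    have gSeq : gS map (map.length : Int) ((PySem.List.pyGetD map 0 []).length : Int) b c = b := by
      rw [gS, if_neg]
      rintro ⟨x1, x2, x3, x4, x5, -⟩; exact hbc ⟨x1, x2, x3, x4, x5⟩
    rw [gAeq, gSeq]; exact ⟨⟨hsh, hin, hrel⟩, hq, hres, hmono⟩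

lemma fold_sim (map : List (List Int)) (vis0 : List (Int × Int)) (res0 : Int) :
    ∀ (L : List (Int × Int)) a b, StepRel map vis0 res0 a b →
    StepRel map vis0 res0 (L.foldl (gA map) a)
      (L.foldl (gS map (map.length : Int) ((PySem.List.pyGetD map 0 []).length : Int)) b) := by
  intro L
  induction L with
  | nil => intro a b h; exact h
  | cons c t ih => intro a b h; exact ih _ _ (step_sim map vis0 res0 a b c h)

set_option maxHeartbeats 2000000 in
lemma bfs_sim (map : List (List Int)) : ∀ (fuel : Nat) (q : List (Int × Int))
    (chk : List (List Bool)) (vis : List (Int × Int)) (res : Int), CInv map chk vis →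
    CInv map (bfsA map fuel chk q res).1
        (floodS map (map.length : Int) ((PySem.List.pyGetD map 0 []).length : Int) fuel vis q) ∧
      (bfsA map fuel chk q res).2 = res +
        (((floodS map (map.length : Int) ((PySem.List.pyGetD map 0 []).length : Int) fuel vis q).length : Int)
          - (vis.length : Int)) ∧
      vis.length ≤ (floodS map (map.length : Int) ((PySem.List.pyGetD map 0 []).length : Int) fuel vis q).length := by
  intro fuel
  induction fuel with
  | zero =>
    intro q chk vis res hinv
    exact ⟨hinv, by simp [bfsA, floodS], le_refl _⟩
  | succ f ih =>
    intro q chk vis res hinv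
    cases q with
    | nil => exact ⟨hinv, by simp [bfsA, floodS], le_refl _⟩
    | cons hd rest =>
      obtain ⟨ex, ey⟩ := hd
      have hA : bfsA map (f + 1) chk ((ex, ey) :: rest) res =
          bfsA map f
            (([(ex + 0, ey + 1), (ex + 1, ey + 0), (ex + 0, ey + -1), (ex + -1, ey + 0)].foldl
              (gA map) (chk, rest, res)).1)
            (([(ex + 0, ey + 1), (ex + 1, ey + 0), (ex + 0, ey + -1), (ex + -1, ey + 0)].foldl
              (gA map) (chk, rest, res)).2.1)
            (([(ex + 0, ey + 1), (ex + 1, ey + 0), (ex + 0, ey + -1), (ex + -1, ey + 0)].foldl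
              (gA map) (chk, rest, res)).2.2) := rfl
      have hB : floodS map (map.length : Int) ((PySem.List.pyGetD map 0 []).length : Int)
            (f + 1) vis ((ex, ey) :: rest) =
          floodS map (map.length : Int) ((PySem.List.pyGetD map 0 []).length : Int) f
            (([(ex, ey + 1), (ex + 1, ey), (ex, ey - 1), (ex - 1, ey)].foldl
              (gS map (map.length : Int) ((PySem.List.pyGetD map 0 []).length : Int)) (vis, rest)).1)
            (([(ex, ey + 1), (ex + 1, ey), (ex, ey - 1), (ex - 1, ey)].foldl
              (gS map (map.length : Int) ((PySem.List.pyGetD map 0 []).length : Int)) (vis, rest)).2) := rfl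
      have hL : ([(ex + 0, ey + 1), (ex + 1, ey + 0), (ex + 0, ey + -1), (ex + -1, ey + 0)] : List (Int × Int)) =
          [(ex, ey + 1), (ex + 1, ey), (ex, ey - 1), (ex - 1, ey)] := by
        norm_num
        omega
      rw [hA, hB, hL]
      have hstep := fold_sim map vis res
        [(ex, ey + 1), (ex + 1, ey), (ex, ey - 1), (ex - 1, ey)]
        (chk, rest, res) (vis, rest) ⟨hinv, rfl, by show res = res + ((vis.length : Int) - vis.length); omega, le_refl _⟩
      obtain ⟨hinv2, hq2, hres2, hmono2⟩ := hstep
      rw [← hq2]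
      obtain ⟨ih1, ih2, ih3⟩ := ih
        (([(ex, ey + 1), (ex + 1, ey), (ex, ey - 1), (ex - 1, ey)].foldl
          (gA map) (chk, rest, res)).2.1)
        (([(ex, ey + 1), (ex + 1, ey), (ex, ey - 1), (ex - 1, ey)].foldl
          (gA map) (chk, rest, res)).1)
        (([(ex, ey + 1), (ex + 1, ey), (ex, ey - 1), (ex - 1, ey)].foldl
          (gS map (map.length : Int) ((PySem.List.pyGetD map 0 []).length : Int)) (vis, rest)).1)
        (([(ex, ey + 1), (ex + 1, ey), (ex, ey - 1), (ex - 1, ey)].foldl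
          (gA map) (chk, rest, res)).2.2) hinv2
      exact ⟨ih1, by omega, by omega⟩

-- paired fold over a common index list
lemma foldl_rel {α β γ : Type} (R : β → γ → Prop) (f : β → α → β) (g : γ → α → γ) :
    ∀ (l : List α) (b : β) (c : γ), R b c →
      (∀ b c a, a ∈ l → R b c → R (f b a) (g c a)) → R (l.foldl f b) (l.foldl g c) := by
  intro l
  induction l with
  | nil => intro b c h _; exact h
  | cons x t ih =>
    intro b c h hstep
    exact ih _ _ (hstep b c x (List.mem_cons_self) h)
      (fun b c a ha => hstep b c a (List.mem_cons_of_mem _ ha))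

lemma maxD_eq_foldl (xs : List Int) (h : ∀ s ∈ xs, (0 : Int) ≤ s) :
    PySem.List.maxD xs (fun x => x) 0 = xs.foldl max 0 := by
  cases xs with
  | nil => rfl
  | cons x t =>
    rw [PySem.List.maxD, PySem.List.max?_id_cons]
    simp only [Option.getD_some, List.foldl_cons]
    rw [max_eq_right (h x (List.mem_cons_self))]

-- relation maintained across the outer scans
def OInv (map : List (List Int)) (a : List (List Bool) × Int × Int)
    (b : List (Int × Int) × List Int) : Prop :=
  CInv map a.1 b.1 ∧ a.2.1 = (b.2.length : Int) ∧ a.2.2 = b.2.foldl max 0 ∧ ∀ s ∈ b.2, (0 : Int) ≤ s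

lemma cell_sim (map : List (List Int)) (i j : Int)
    (hij : InR map (i, j)) (a : List (List Bool) × Int × Int) (b : List (Int × Int) × List Int)
    (h : OInv map a b) :
    OInv map
      (if pyCell map i j = 1 ∧ chkGet a.1 i j = false then
        (((bfsA map (map.length * (PySem.List.pyGetD map 0 []).length + 1) (chkSet a.1 i j) [(i, j)] 1).1,
          a.2.1 + 1,
          max a.2.2 (bfsA map (map.length * (PySem.List.pyGetD map 0 []).length + 1) (chkSet a.1 i j) [(i, j)] 1).2))
      else a)
      (if pyCell map i j = 1 ∧ (i, j) ∉ b.1 then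
        ((floodS map (map.length : Int) ((PySem.List.pyGetD map 0 []).length : Int)
            (map.length * (PySem.List.pyGetD map 0 []).length + 1) (PySem.Set.add b.1 (i, j)) [(i, j)],
          b.2 ++ [((floodS map (map.length : Int) ((PySem.List.pyGetD map 0 []).length : Int)
            (map.length * (PySem.List.pyGetD map 0 []).length + 1) (PySem.Set.add b.1 (i, j)) [(i, j)]).length : Int)
            - (b.1.length : Int)]))
      else b) := by
  obtain ⟨hinv, hcount, hmax, hpos⟩ := h
  by_cases hcell : pyCell map i j = 1
  · by_cases hmem : (i, j) ∈ b.1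
    · have hchk : chkGet a.1 i j = true := (hinv.2.2 (i, j) hij).2 hmem
      rw [if_neg (by rintro ⟨-, hfalse⟩; rw [hchk] at hfalse; cases hfalse),
        if_neg (by rintro ⟨-, hnot⟩; exact hnot hmem)]
      exact ⟨hinv, hcount, hmax, hpos⟩
    · have hchk : chkGet a.1 i j = false := by
        rcases Bool.eq_false_or_eq_true (chkGet a.1 i j) with h | h
        · exact absurd ((hinv.2.2 (i, j) hij).1 h) hmem
        · exact h
      rw [if_pos ⟨hcell, hchk⟩, if_pos ⟨hcell, hmem⟩]
      have hseed : CInv map (chkSet a.1 i j) (PySem.Set.add b.1 (i, j)) := by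
        refine ⟨shape_chkSet hinv.1 hij, ?_, ?_⟩
        · intro p hp
          rcases (PySem.Set.mem_add b.1 (i, j) p).1 hp with h | h
          · exact hinv.2.1 p h
          · subst h; exact hij
        · intro p hpInR
          rw [show chkGet (chkSet a.1 i j) p.1 p.2 =
              chkGet (chkSet a.1 ((i, j) : Int × Int).1 ((i, j) : Int × Int).2) p.1 p.2 from rfl,
            chkGet_chkSet hinv.1 hij hpInR]
          by_cases hpc : p = (i, j)
          · simp [hpc, PySem.Set.mem_add]
          · simp only [if_neg hpc]
            rw [hinv.2.2 p hpInR, PySem.Set.mem_add]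
            simp [hpc]
      obtain ⟨b1, b2, b3⟩ := bfs_sim map
        (map.length * (PySem.List.pyGetD map 0 []).length + 1) [(i, j)]
        (chkSet a.1 i j) (PySem.Set.add b.1 (i, j)) 1 hseed
      have hlen : (PySem.Set.add b.1 (i, j)).length = b.1.length + 1 := length_set_add hmem
      refine ⟨b1, ?_, ?_, ?_⟩
      · simp only [List.length_append, List.length_cons, List.length_nil]
        rw [hcount]; push_cast; ring
      · simp only [List.foldl_append, List.foldl_cons, List.foldl_nil]
        rw [hmax]
        congr 1
        omega
      · intro s hs
        rcases List.mem_append.1 hs with h | h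
        · exact hpos s h
        · rw [List.mem_singleton] at h
          subst h
          omega
  · rw [if_neg (by rintro ⟨h, -⟩; exact hcell h), if_neg (by rintro ⟨h, -⟩; exact hcell h)]
    exact ⟨hinv, hcount, hmax, hpos⟩

-- the outer scans of the two programs, named for the paired-fold argument
def outerA (map : List (List Int)) : List (List Bool) × Int × Int :=
  (PySem.List.pyRange 0 (map.length : Int)).foldl (fun s i =>
    (PySem.List.pyRange 0 ((PySem.List.pyGetD map 0 []).length : Int)).foldl
      (fun (s : List (List Bool) × Int × Int) j =>
        if pyCell map i j = 1 ∧ chkGet s.1 i j = false then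
          ((bfsA map (map.length * (PySem.List.pyGetD map 0 []).length + 1)
              (chkSet s.1 i j) [(i, j)] 1).1,
            s.2.1 + 1,
            max s.2.2 (bfsA map (map.length * (PySem.List.pyGetD map 0 []).length + 1)
              (chkSet s.1 i j) [(i, j)] 1).2)
        else s) s)
    (List.replicate map.length (List.replicate (PySem.List.pyGetD map 0 []).length false),
      (0 : Int), (0 : Int))

def outerS (map : List (List Int)) : PySem.Set (Int × Int) × List Int :=
  (PySem.List.enumerate map).foldl (fun s p =>
    (PySem.List.pyRange 0 ((PySem.List.pyGetD map 0 []).length : Int)).foldl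
      (fun (s : PySem.Set (Int × Int) × List Int) j =>
        if PySem.List.pyGetD p.2 j 0 = 1 ∧ (p.1, j) ∉ s.1 then
          (floodS map (map.length : Int) ((PySem.List.pyGetD map 0 []).length : Int)
              (map.length * (PySem.List.pyGetD map 0 []).length + 1)
              (PySem.Set.add s.1 (p.1, j)) [(p.1, j)],
            s.2 ++ [((floodS map (map.length : Int) ((PySem.List.pyGetD map 0 []).length : Int)
              (map.length * (PySem.List.pyGetD map 0 []).length + 1)
              (PySem.Set.add s.1 (p.1, j)) [(p.1, j)]).length : Int) - (s.1.length : Int)])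
        else s) s) (PySem.Set.empty, ([] : List Int))

lemma replicate_getD_false (n m a b : Nat) :
    ((List.replicate n (List.replicate m false)).getD a []).getD b false = false := by
  rcases Nat.lt_or_ge a n with h | h
  · rw [List.getD_eq_getElem?_getD (l := List.replicate n (List.replicate m false)),
      List.getElem?_replicate, if_pos h, Option.getD_some, List.getD_eq_getElem?_getD,
      List.getElem?_replicate]
    split <;> simp
  · rw [List.getD_eq_getElem?_getD (l := List.replicate n (List.replicate m false)),
      List.getElem?_replicate, if_neg (Nat.not_lt.2 h)]
    simp

lemma cinv_init (map : List (List Int)) :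
    CInv map (List.replicate map.length
      (List.replicate (PySem.List.pyGetD map 0 []).length false)) [] := by
  refine ⟨⟨by simp, ?_⟩, by simp, ?_⟩
  · intro r hr
    rw [List.eq_of_mem_replicate hr]
    simp
  · intro p hp
    obtain ⟨h1, h2, h3, h4⟩ := hp
    rw [chkGet_eq _ h1 h3, replicate_getD_false]
    simp

lemma outer_sim (map : List (List Int)) : OInv map (outerA map) (outerS map) := by
  unfold outerA outerS
  rw [PySem.List.enumerate_eq_map_pyRange map [], List.foldl_map, PySem.List.len_eq]
  refine foldl_rel (OInv map) _ _ _ _ _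
    ⟨cinv_init map, by simp, by simp, by simp⟩ ?_
  intro sa sb i hi hR
  refine foldl_rel (OInv map) _ _ _ _ _ hR ?_
  intro sa2 sb2 j hj hR2
  have hib := PySem.List.mem_pyRange_one.1 hi
  have hjb := PySem.List.mem_pyRange_one.1 hj
  exact cell_sim map i j ⟨hib.1, hib.2, hjb.1, hjb.2⟩ sa2 sb2 hR2

lemma solution_eq_set (map : List (List Int)) : solution map = solutionSet map := by
  have hA : solution map = ((outerA map).2.1, (outerA map).2.2) := rfl
  have hB : solutionSet map =
      (((outerS map).2.length : Int), PySem.List.maxD (outerS map).2 (fun x => x) 0) := rfl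
  obtain ⟨-, hcount, hmax, hpos⟩ := outer_sim map
  rw [hA, hB, hcount, hmax, maxD_eq_foldl _ hpos]

-- ---------- the grid graph and its components (proof layer) ----------
def colN (map : List (List Int)) : Nat := (PySem.List.pyGetD map 0 []).length
def rowN (map : List (List Int)) : Nat := map.length
def NN (map : List (List Int)) : Nat := rowN map * colN map
def idxC (map : List (List Int)) (c : Int × Int) : Int := c.1 * (colN map : Int) + c.2

def rasterL (map : List (List Int)) : List (Int × Int) :=
  (PySem.List.pyRange 0 (rowN map : Int)).flatMap (fun i =>
    (PySem.List.pyRange 0 (colN map : Int)).map (fun j => (i, j)))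

def onesPred (map : List (List Int)) (c : Int × Int) : Bool := pyCell map c.1 c.2 == 1

def onesT (map : List (List Int)) : Finset (Int × Int) := (onesB map).toFinset

def nbrsL (map : List (List Int)) (c : Int × Int) : List (Int × Int) :=
  (candsB c).filter (fun n => decide (n ∈ onesB map))

def nbrsF (map : List (List Int)) (c : Int × Int) : Finset (Int × Int) :=
  (nbrsL map c).toFinset

def Fst (map : List (List Int)) (s : Finset (Int × Int)) : Finset (Int × Int) :=
  s ∪ s.biUnion (nbrsF map)

def iterF (map : List (List Int)) : Nat → Finset (Int × Int) → Finset (Int × Int)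
  | 0, s => s
  | k + 1, s => iterF map k (Fst map s)

def ball (map : List (List Int)) (k : Nat) (c : Int × Int) : Finset (Int × Int) :=
  iterF map k {c}

def comp (map : List (List Int)) (c : Int × Int) : Finset (Int × Int) :=
  ball map (NN map) c

def minIdx (map : List (List Int)) (S : Finset (Int × Int)) : Int :=
  ((S.image (idxC map)).min).untopD 0

def isMinB (map : List (List Int)) (c : Int × Int) : Bool :=
  decide (idxC map c = minIdx map (comp map c))

def mfun (map : List (List Int)) (c : Int × Int) : Int := minIdx map (comp map c)

def minCells (map : List (List Int)) : List (Int × Int) := (onesB map).filter (isMinB map)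

def sizesL (map : List (List Int)) : List Int :=
  (minCells map).map (fun c => ((comp map c).card : Int))

-- ---------- basic facts about onesB / rasterL ----------
lemma mem_rasterL (map : List (List Int)) (c : Int × Int) :
    c ∈ rasterL map ↔ 0 ≤ c.1 ∧ c.1 < (rowN map : Int) ∧ 0 ≤ c.2 ∧ c.2 < (colN map : Int) := by
  unfold rasterL
  simp only [List.mem_flatMap, List.mem_map, PySem.List.mem_pyRange_one]
  constructor
  · rintro ⟨i, ⟨hi0, hi⟩, j, ⟨hj0, hj⟩, rfl⟩; exact ⟨hi0, hi, hj0, hj⟩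
  · rintro ⟨h1, h2, h3, h4⟩; exact ⟨c.1, ⟨h1, h2⟩, c.2, ⟨h3, h4⟩, rfl⟩

lemma pairwise_rasterL (map : List (List Int)) :
    (rasterL map).Pairwise (fun a b => idxC map a < idxC map b) := by
  unfold rasterL
  rw [List.pairwise_flatMap]
  refine ⟨?_, ?_⟩
  · intro i _
    rw [List.pairwise_map]
    refine (PySem.List.pairwise_lt_pyRange_one 0 (colN map : Int)).imp ?_
    intro a b h
    simp only [idxC]
    omega
  · refine (PySem.List.pairwise_lt_pyRange_one 0 (rowN map : Int)).imp ?_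
    intro a b hab x hx y hy
    simp only [List.mem_map, PySem.List.mem_pyRange_one] at hx hy
    obtain ⟨ja, ⟨hja0, hja⟩, rfl⟩ := hx
    obtain ⟨jb, ⟨hjb0, hjb⟩, rfl⟩ := hy
    simp only [idxC]
    nlinarith

lemma onesB_eq_filter_raster (map : List (List Int)) :
    onesB map = (rasterL map).filter (onesPred map) := by
  unfold onesB rasterL onesPred
  rw [List.filter_flatMap]
  simp only [List.filter_map]
  rfl

lemma mem_onesB (map : List (List Int)) (c : Int × Int) :
    c ∈ onesB map ↔ 0 ≤ c.1 ∧ c.1 < (rowN map : Int) ∧ 0 ≤ c.2 ∧ c.2 < (colN map : Int) ∧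
      pyCell map c.1 c.2 = 1 := by
  rw [onesB_eq_filter_raster, List.mem_filter, mem_rasterL]
  simp only [onesPred, beq_iff_eq]
  tauto

lemma pairwise_onesB (map : List (List Int)) :
    (onesB map).Pairwise (fun a b => idxC map a < idxC map b) := by
  rw [onesB_eq_filter_raster]
  exact (pairwise_rasterL map).filter _

lemma nodup_onesB (map : List (List Int)) : (onesB map).Nodup := by
  exact (pairwise_onesB map).imp (fun h heq => by subst heq; omega)

lemma idxC_inj (map : List (List Int)) {a b : Int × Int}
    (ha : a ∈ onesB map) (hb : b ∈ onesB map) (h : idxC map a = idxC map b) : a = b := by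
  rw [mem_onesB] at ha hb
  obtain ⟨ha1, ha2, ha3, ha4, -⟩ := ha
  obtain ⟨hb1, hb2, hb3, hb4, -⟩ := hb
  simp only [idxC] at h
  have hcol : (0 : Int) ≤ (colN map : Int) := by positivity
  have h1 : a.1 = b.1 := by
    rcases lt_trichotomy a.1 b.1 with hlt | heq | hgt
    · exfalso
      have : (a.1 + 1) * (colN map : Int) ≤ b.1 * (colN map : Int) :=
        mul_le_mul_of_nonneg_right (by omega) hcol
      nlinarith
    · exact heq
    · exfalso
      have : (b.1 + 1) * (colN map : Int) ≤ a.1 * (colN map : Int) :=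
        mul_le_mul_of_nonneg_right (by omega) hcol
      nlinarith
  have h2 : a.2 = b.2 := by rw [h1] at h; omega
  exact Prod.ext h1 h2

lemma length_onesB_le (map : List (List Int)) : (onesB map).length ≤ NN map := by
  unfold onesB
  rw [List.length_flatMap]
  have hb : ∀ x ∈ (PySem.List.pyRange 0 (map.length : Int)).map (fun i =>
      (((PySem.List.pyRange 0 ((PySem.List.pyGetD map 0 []).length : Int)).filter
        (fun j => pyCell map i j == 1)).map (fun j => (i, j))).length), x ≤ colN map := by
    intro x hx
    obtain ⟨i, -, rfl⟩ := List.mem_map.1 hx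
    calc _ ≤ (PySem.List.pyRange 0 ((PySem.List.pyGetD map 0 []).length : Int)).length := by
          rw [List.length_map]; exact List.length_filter_le _ _
    _ = colN map := by rw [PySem.List.length_pyRange_one]; simp [colN]
  calc _ ≤ _ := List.sum_le_card_nsmul _ _ hb
  _ = NN map := by
        rw [List.length_map, PySem.List.length_pyRange_one, smul_eq_mul]
        simp [NN, rowN]

lemma card_onesT_le (map : List (List Int)) : (onesT map).card ≤ NN map :=
  le_trans (List.toFinset_card_le _) (length_onesB_le map)

lemma mem_candsB_symm {c d : Int × Int} : d ∈ candsB c ↔ c ∈ candsB d := by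
  simp only [candsB, List.mem_cons, List.not_mem_nil, or_false, Prod.ext_iff]
  omega

lemma mem_nbrsL (map : List (List Int)) (c n : Int × Int) :
    n ∈ nbrsL map c ↔ n ∈ candsB c ∧ n ∈ onesB map := by
  simp [nbrsL, List.mem_filter]

lemma nbrsL_symm (map : List (List Int)) {c d : Int × Int} (hc : c ∈ onesB map)
    (h : d ∈ nbrsL map c) : c ∈ nbrsL map d := by
  rw [mem_nbrsL] at h ⊢
  exact ⟨mem_candsB_symm.1 h.1, hc⟩

-- ---------- iterF / ball / comp ----------
lemma subset_Fst (map : List (List Int)) (s : Finset (Int × Int)) : s ⊆ Fst map s :=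
  Finset.subset_union_left

lemma Fst_mono (map : List (List Int)) {s t : Finset (Int × Int)} (h : s ⊆ t) :
    Fst map s ⊆ Fst map t :=
  Finset.union_subset_union h (Finset.biUnion_subset_biUnion_of_subset_left _ h)

lemma Fst_union (map : List (List Int)) (s t : Finset (Int × Int)) :
    Fst map (s ∪ t) = Fst map s ∪ Fst map t := by
  simp only [Fst, Finset.union_biUnion]
  ext x
  simp only [Finset.mem_union]
  tauto

lemma iterF_comm (map : List (List Int)) :
    ∀ (k : Nat) (s : Finset (Int × Int)), iterF map k (Fst map s) = Fst map (iterF map k s) := by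
  intro k
  induction k with
  | zero => intro s; rfl
  | succ k ih =>
    intro s
    show iterF map k (Fst map (Fst map s)) = Fst map (iterF map k (Fst map s))
    rw [ih (Fst map s)]

lemma iterF_union (map : List (List Int)) :
    ∀ (k : Nat) (s t : Finset (Int × Int)),
      iterF map k (s ∪ t) = iterF map k s ∪ iterF map k t := by
  intro k
  induction k with
  | zero => intro s t; rfl
  | succ k ih =>
    intro s t
    show iterF map k (Fst map (s ∪ t)) = _
    rw [Fst_union, ih]
    rfl

lemma iterF_empty (map : List (List Int)) : ∀ k : Nat, iterF map k ∅ = ∅ := by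
  intro k
  induction k with
  | zero => rfl
  | succ k ih =>
    show iterF map k (Fst map ∅) = ∅
    have : Fst map ∅ = ∅ := by simp [Fst]
    rw [this, ih]

lemma iterF_biUnion (map : List (List Int)) (k : Nat) (S : Finset (Int × Int))
    (f : (Int × Int) → Finset (Int × Int)) :
    iterF map k (S.biUnion f) = S.biUnion (fun x => iterF map k (f x)) := by
  induction S using Finset.induction_on with
  | empty => simp [iterF_empty]
  | insert a S ha ih =>
    rw [Finset.biUnion_insert, Finset.biUnion_insert, iterF_union, ih]

lemma subset_iterF (map : List (List Int)) : ∀ (k : Nat) (s : Finset (Int × Int)), s ⊆ iterF map k s := by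
  intro k
  induction k with
  | zero => intro s; exact subset_rfl
  | succ k ih =>
    intro s
    exact subset_trans (subset_Fst map s) (ih (Fst map s))

lemma mem_ball_self (map : List (List Int)) (k : Nat) (c : Int × Int) : c ∈ ball map k c :=
  subset_iterF map k {c} (Finset.mem_singleton_self c)

lemma ball_succ_right (map : List (List Int)) (k : Nat) (c : Int × Int) :
    ball map (k + 1) c = Fst map (ball map k c) := by
  show iterF map k (Fst map {c}) = _
  rw [iterF_comm]
  rfl

lemma ball_succ_left (map : List (List Int)) (k : Nat) (c : Int × Int) :
    ball map (k + 1) c = ball map k c ∪ (nbrsF map c).biUnion (ball map k) := by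
  have h1 : Fst map {c} = {c} ∪ nbrsF map c := by
    simp [Fst, Finset.singleton_biUnion]
  have h2 : (nbrsF map c : Finset (Int × Int)) = (nbrsF map c).biUnion (fun a => {a}) := by
    rw [Finset.biUnion_singleton_eq_self]
  show iterF map k (Fst map {c}) = _
  rw [h1, iterF_union]
  congr 1
  conv_lhs => rw [h2]
  rw [iterF_biUnion]
  rfl

lemma iterF_subset_onesT (map : List (List Int)) :
    ∀ (k : Nat) (s : Finset (Int × Int)), s ⊆ onesT map → iterF map k s ⊆ onesT map := by
  intro k
  induction k with
  | zero => intro s hs; exact hs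
  | succ k ih =>
    intro s hs
    refine ih _ ?_
    intro x hx
    simp only [Fst, Finset.mem_union] at hx
    rcases hx with h | h
    · exact hs h
    · obtain ⟨p, -, hp⟩ := Finset.mem_biUnion.1 h
      rw [nbrsF, List.mem_toFinset, mem_nbrsL] at hp
      exact List.mem_toFinset.2 hp.2

lemma ball_subset_onesT (map : List (List Int)) (k : Nat) {c : Int × Int} (hc : c ∈ onesB map) :
    ball map k c ⊆ onesT map :=
  iterF_subset_onesT map k {c} (Finset.singleton_subset_iff.2 (List.mem_toFinset.2 hc))

lemma closed_iterF_subset (map : List (List Int)) {S : Finset (Int × Int)} (hS : Fst map S ⊆ S) :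
    ∀ (k : Nat) {s : Finset (Int × Int)}, s ⊆ S → iterF map k s ⊆ S := by
  intro k
  induction k with
  | zero => intro s h; exact h
  | succ k ih =>
    intro s h
    exact ih (subset_trans (Fst_mono map h) hS)

lemma comp_closed (map : List (List Int)) {c : Int × Int} (hc : c ∈ onesB map) :
    Fst map (comp map c) = comp map c := by
  have key : ∀ k : Nat, Fst map (ball map k c) = ball map k c ∨ k + 1 ≤ (ball map k c).card := by
    intro k
    induction k with
    | zero =>
      right
      simp [ball, iterF]
    | succ k ih =>
      by_cases hf : Fst map (ball map k c) = ball map k c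
      · left
        rw [ball_succ_right, hf, hf]
      · rcases ih with h | h
        · exact absurd h hf
        · right
          have hsub : ball map k c ⊂ Fst map (ball map k c) :=
            HasSubset.Subset.ssubset_of_ne (subset_Fst map _) (fun he => hf he.symm)
          have := Finset.card_lt_card hsub
          rw [ball_succ_right]
          omega
  rcases key (NN map) with h | h
  · exact h
  · exfalso
    have h2 := Finset.card_le_card (ball_subset_onesT map (NN map) hc)
    have h3 := card_onesT_le map
    omega

lemma ball_succ_NN (map : List (List Int)) {c : Int × Int} (hc : c ∈ onesB map) :
    ball map (NN map + 1) c = comp map c := by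
  rw [ball_succ_right]
  exact comp_closed map hc

lemma ball_symm (map : List (List Int)) :
    ∀ (k : Nat) {c d : Int × Int}, c ∈ onesB map → d ∈ ball map k c → c ∈ ball map k d := by
  intro k
  induction k with
  | zero =>
    intro c d _ hd
    simp only [ball, iterF, Finset.mem_singleton] at hd ⊢
    exact hd.symm
  | succ k ih =>
    intro c d hc hd
    rw [ball_succ_left] at hd
    rcases Finset.mem_union.1 hd with h | h
    · have := ih hc h
      rw [ball_succ_right]
      exact subset_Fst map _ this
    · obtain ⟨n, hn, hdn⟩ := Finset.mem_biUnion.1 h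
      rw [nbrsF, List.mem_toFinset] at hn
      have hnones : n ∈ onesB map := ((mem_nbrsL map c n).1 hn).2
      have hnd : n ∈ ball map k d := ih hnones hdn
      have hcn : c ∈ nbrsL map n := nbrsL_symm map hc hn
      rw [ball_succ_right]
      simp only [Fst, Finset.mem_union]
      right
      exact Finset.mem_biUnion.2 ⟨n, hnd, List.mem_toFinset.2 hcn⟩

lemma mem_comp_self (map : List (List Int)) (c : Int × Int) : c ∈ comp map c :=
  mem_ball_self map (NN map) c

lemma comp_subset_onesT (map : List (List Int)) {c : Int × Int} (hc : c ∈ onesB map) :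
    comp map c ⊆ onesT map := ball_subset_onesT map (NN map) hc

lemma mem_onesB_of_mem_comp (map : List (List Int)) {c d : Int × Int} (hc : c ∈ onesB map)
    (hd : d ∈ comp map c) : d ∈ onesB map :=
  List.mem_toFinset.1 (comp_subset_onesT map hc hd)

lemma comp_eq_of_mem (map : List (List Int)) {c d : Int × Int} (hc : c ∈ onesB map)
    (hd : d ∈ comp map c) : comp map d = comp map c := by
  have hd' : d ∈ onesB map := mem_onesB_of_mem_comp map hc hd
  apply Finset.Subset.antisymm
  · exact closed_iterF_subset map (le_of_eq (comp_closed map hc)) (NN map)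
      (Finset.singleton_subset_iff.2 hd)
  · have hcd : c ∈ comp map d := ball_symm map (NN map) hc hd
    exact closed_iterF_subset map (le_of_eq (comp_closed map hd')) (NN map)
      (Finset.singleton_subset_iff.2 hcd)

lemma mem_comp_of_nbr (map : List (List Int)) {c p n : Int × Int} (hc : c ∈ onesB map)
    (hp : p ∈ comp map c) (hn : n ∈ nbrsL map p) : n ∈ comp map c := by
  rw [← comp_closed map hc]
  simp only [Fst, Finset.mem_union]
  right
  exact Finset.mem_biUnion.2 ⟨p, hp, List.mem_toFinset.2 hn⟩

-- ---------- minIdx ----------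
lemma minIdx_singleton (map : List (List Int)) (c : Int × Int) : minIdx map {c} = idxC map c := by
  simp [minIdx]

lemma minIdx_le (map : List (List Int)) {S : Finset (Int × Int)} {x : Int × Int} (h : x ∈ S) :
    minIdx map S ≤ idxC map x := by
  have himg : idxC map x ∈ S.image (idxC map) := Finset.mem_image_of_mem _ h
  obtain ⟨m, hm⟩ := Finset.min_of_nonempty ⟨_, himg⟩
  have hle := Finset.min_le himg
  rw [hm] at hle
  rw [minIdx, hm]
  have hmle : m ≤ idxC map x := by exact_mod_cast hle
  simpa using hmle

lemma minIdx_mem (map : List (List Int)) {S : Finset (Int × Int)} (h : S.Nonempty) :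
    ∃ m ∈ S, idxC map m = minIdx map S := by
  obtain ⟨v, hv⟩ := Finset.min_of_nonempty (h.image (idxC map))
  obtain ⟨m, hmS, hmv⟩ := Finset.mem_image.1 (Finset.mem_of_min hv)
  refine ⟨m, hmS, ?_⟩
  rw [minIdx, hv, hmv]
  simp

lemma minIdx_union (map : List (List Int)) {S T : Finset (Int × Int)} (hS : S.Nonempty)
    (hT : T.Nonempty) : minIdx map (S ∪ T) = min (minIdx map S) (minIdx map T) := by
  obtain ⟨vS, hvS⟩ := Finset.min_of_nonempty (hS.image (idxC map))
  obtain ⟨vT, hvT⟩ := Finset.min_of_nonempty (hT.image (idxC map))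
  rw [minIdx, Finset.image_union, Finset.min_union, hvS, hvT, minIdx, hvS, minIdx, hvT,
    ← WithTop.coe_inf]
  simp [min_def]

-- ---------- the label dictionary ----------
lemma dict_fold_get? (f : (Int × Int) → Int) :
    ∀ (L : List (Int × Int)) (D : PySem.Dict (Int × Int) Int) (x : Int × Int),
      (L.foldl (fun d c => d.insert c (f c)) D).get? x =
        if x ∈ L then some (f x) else D.get? x := by
  intro L
  induction L with
  | nil => intro D x; simp
  | cons a t ih =>
    intro D x
    rw [List.foldl_cons, ih]
    by_cases hxt : x ∈ t
    · rw [if_pos hxt, if_pos (List.mem_cons_of_mem _ hxt)]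
    · by_cases hxa : x = a
      · subst hxa
        rw [if_neg hxt, if_pos List.mem_cons_self, PySem.Dict.get?_insert_self]
      · rw [if_neg hxt, PySem.Dict.get?_insert_of_ne, if_neg (by simp [hxa, hxt])]
        exact hxa

lemma dict_fold_keys (f : (Int × Int) → Int) (L : List (Int × Int)) (h : L.Nodup) :
    (L.foldl (fun d c => d.insert c (f c)) PySem.Dict.empty).keys = L := by
  rw [PySem.Dict.keys_foldl_insert, PySem.Dict.keys_empty, PySem.Set.update_nil_left]
  exact PySem.Set.ofList_eq_self_of_nodup _ h

lemma pyMinB_cons (a : Int) (l : List Int) : pyMinB (a :: l) = l.foldl min a := by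
  rw [pyMinB, PySem.List.min?_id_cons]
  rfl

lemma foldl_min_minIdx (map : List (List Int)) (k : Nat) :
    ∀ (L : List (Int × Int)) (S : Finset (Int × Int)), S.Nonempty →
      (L.map (fun n => minIdx map (ball map k n))).foldl min (minIdx map S) =
        minIdx map (S ∪ L.toFinset.biUnion (ball map k)) := by
  intro L
  induction L with
  | nil =>
    intro S hS
    simp
  | cons n t ih =>
    intro S hS
    have hball : (ball map k n).Nonempty := ⟨n, mem_ball_self map k n⟩
    rw [List.map_cons, List.foldl_cons, ← minIdx_union map hS hball,
      ih (S ∪ ball map k n) (hS.inl)]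
    congr 1
    rw [List.toFinset_cons, Finset.biUnion_insert]
    ext x
    simp only [Finset.mem_union]
    tauto

lemma propB_eq_iterate (ones : List (Int × Int)) :
    ∀ (f : Nat) (l : PySem.Dict (Int × Int) Int),
      propB ones f l = (fun l => stepB l ones)^[f] l := by
  intro f
  induction f with
  | zero => intro l; rfl
  | succ f ih =>
    intro l
    show (if stepB l ones = l then l else propB ones f (stepB l ones)) = _
    by_cases h : stepB l ones = l
    · rw [if_pos h]
      exact (Function.iterate_fixed h (f + 1)).symm
    · rw [if_neg h, ih]
      exact (Function.iterate_succ_apply _ f l).symm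

-- the final label of every 1-cell is the minimal raster index of its component
lemma labels_iterate (map : List (List Int)) :
    ∀ (k : Nat),
      ((fun l => stepB l (onesB map))^[k]
          ((onesB map).foldl (fun d c => d.insert c (c.1 * (colN map : Int) + c.2))
            PySem.Dict.empty)).keys = onesB map ∧
      ∀ c ∈ onesB map,
        ((fun l => stepB l (onesB map))^[k]
            ((onesB map).foldl (fun d c => d.insert c (c.1 * (colN map : Int) + c.2))
              PySem.Dict.empty)).getD c 0 = minIdx map (ball map k c) := by
  intro k
  induction k with
  | zero =>
    refine ⟨dict_fold_keys _ _ (nodup_onesB map), ?_⟩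
    intro c hc
    rw [Function.iterate_zero_apply, PySem.Dict.getD_eq_get?_getD,
      dict_fold_get? (fun c => c.1 * (colN map : Int) + c.2) _ _ c, if_pos hc]
    show c.1 * (colN map : Int) + c.2 = minIdx map (ball map 0 c)
    rw [show ball map 0 c = {c} from rfl, minIdx_singleton]
    rfl
  | succ k ih =>
    obtain ⟨ihk, ihv⟩ := ih
    rw [Function.iterate_succ_apply']
    set l := (fun l => stepB l (onesB map))^[k]
      ((onesB map).foldl (fun d c => d.insert c (c.1 * (colN map : Int) + c.2))
        PySem.Dict.empty) with hl
    constructor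
    · exact dict_fold_keys _ _ (nodup_onesB map)
    · intro c hc
      show (stepB l (onesB map)).getD c 0 = _
      unfold stepB
      rw [PySem.Dict.getD_eq_get?_getD,
        dict_fold_get? (fun c => pyMinB (l.getD c 0 ::
          ((candsB c).filter (fun n => l.contains n)).map (fun n => l.getD n 0))) _ _ c,
        if_pos hc]
      simp only [Option.getD_some]
      have hcont : ∀ n : Int × Int, l.contains n = decide (n ∈ onesB map) := by
        intro n
        rw [PySem.Dict.contains_eq_decide_mem_keys, ihk]
      have hfilter : (candsB c).filter (fun n => l.contains n) = nbrsL map c := by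
        unfold nbrsL
        exact List.filter_congr (fun n _ => by rw [hcont])
      rw [hfilter]
      have hmapv : (nbrsL map c).map (fun n => l.getD n 0) =
          (nbrsL map c).map (fun n => minIdx map (ball map k n)) :=
        List.map_congr_left (fun n hn => ihv n ((mem_nbrsL map c n).1 hn).2)
      rw [hmapv, ihv c hc, pyMinB_cons,
        foldl_min_minIdx map k _ _ ⟨c, mem_ball_self map k c⟩, ball_succ_left]
      rfl

lemma values_final (map : List (List Int)) :
    (propB (onesB map) (map.length * (PySem.List.pyGetD map 0 []).length + 1)
        ((onesB map).foldl (fun d c =>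
          d.insert c (c.1 * (((PySem.List.pyGetD map 0 []).length : Nat) : Int) + c.2))
          PySem.Dict.empty)).values = (onesB map).map (mfun map) := by
  show (propB (onesB map) (NN map + 1)
      ((onesB map).foldl (fun d c => d.insert c (c.1 * (colN map : Int) + c.2))
        PySem.Dict.empty)).values = _
  rw [propB_eq_iterate]
  obtain ⟨hkeys, hval⟩ := labels_iterate map (NN map + 1)
  rw [PySem.Dict.values_eq_map_keys _ (by rw [hkeys]; exact nodup_onesB map) 0, hkeys]
  exact List.map_congr_left (fun c hc => by rw [hval c hc, ball_succ_NN map hc]; rfl)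

-- ---------- A-side: the outer scan over the raster ----------
def phi (map : List (List Int)) (s : PySem.Set (Int × Int) × List Int) (c : Int × Int) :
    PySem.Set (Int × Int) × List Int :=
  if pyCell map c.1 c.2 = 1 ∧ c ∉ s.1 then
    (floodS map (rowN map : Int) (colN map : Int) (NN map + 1) (PySem.Set.add s.1 c) [c],
     s.2 ++ [((floodS map (rowN map : Int) (colN map : Int) (NN map + 1)
       (PySem.Set.add s.1 c) [c]).length : Int) - (s.1.length : Int)])
  else s

lemma outerS_eq_raster (map : List (List Int)) :
    outerS map = (rasterL map).foldl (phi map) (PySem.Set.empty, ([] : List Int)) := by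
  unfold outerS rasterL
  rw [PySem.List.enumerate_eq_map_pyRange map [], List.foldl_map, List.foldl_flatMap,
    PySem.List.len_eq]
  simp only [List.foldl_map]
  rfl

lemma nodup_subset_length {l L : List (Int × Int)} (hnd : l.Nodup) (hsub : ∀ x ∈ l, x ∈ L) :
    l.length ≤ L.length := by
  rw [← List.toFinset_card_of_nodup hnd]
  calc l.toFinset.card ≤ L.toFinset.card :=
        Finset.card_le_card (fun x hx => List.mem_toFinset.2 (hsub x (List.mem_toFinset.1 hx)))
  _ ≤ L.length := List.toFinset_card_le _

-- conclusions of the inner neighbour fold of the flood fill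
def GSConc (map : List (List Int)) (c : Int × Int) (L vis rest : List (Int × Int))
    (r : PySem.Set (Int × Int) × List (Int × Int)) : Prop :=
  r.1.Nodup ∧
  (∀ v ∈ r.1, v ∈ onesB map) ∧
  (∀ v ∈ vis, v ∈ r.1) ∧
  (∀ v ∈ r.1, v ∈ vis ∨ v ∈ comp map c) ∧
  (∀ v ∈ r.1, v ∈ vis ∨ v ∈ r.2) ∧
  (∀ p ∈ r.2, p ∈ r.1) ∧
  (∀ p ∈ r.2, p ∈ comp map c) ∧
  (∀ p ∈ rest, p ∈ r.2) ∧
  (∀ n ∈ L, n ∈ onesB map → n ∈ r.1) ∧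
  r.1.length + rest.length = vis.length + r.2.length

lemma gS_fold (map : List (List Int)) {c x : Int × Int} (hc : c ∈ onesB map)
    (hx : x ∈ comp map c) :
    ∀ (L vis rest : List (Int × Int)),
      (∀ n ∈ L, n ∈ candsB x) →
      vis.Nodup → (∀ v ∈ vis, v ∈ onesB map) →
      (∀ p ∈ rest, p ∈ vis) → (∀ p ∈ rest, p ∈ comp map c) →
      GSConc map c L vis rest
        (L.foldl (gS map (rowN map : Int) (colN map : Int)) (vis, rest)) := by
  intro L
  induction L with
  | nil =>
    intro vis rest hL hnd hones hrv hrc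
    exact ⟨hnd, hones, fun v hv => hv, fun v hv => Or.inl hv, fun v hv => Or.inl hv,
      hrv, hrc, fun p hp => hp, by simp, by simp⟩
  | cons n t ih =>
    intro vis rest hL hnd hones hrv hrc
    rw [List.foldl_cons]
    have hncands : n ∈ candsB x := hL n List.mem_cons_self
    by_cases hcond : 0 ≤ n.1 ∧ n.1 < (rowN map : Int) ∧ 0 ≤ n.2 ∧ n.2 < (colN map : Int) ∧
        pyCell map n.1 n.2 = 1 ∧ n ∉ vis
    · have hnones : n ∈ onesB map := (mem_onesB map n).2
        ⟨hcond.1, hcond.2.1, hcond.2.2.1, hcond.2.2.2.1, hcond.2.2.2.2.1⟩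
      have hnvis : n ∉ vis := hcond.2.2.2.2.2
      have hgs : gS map (rowN map : Int) (colN map : Int) (vis, rest) n =
          (vis ++ [n], n :: rest) := by
        rw [gS, if_pos hcond]
        rw [PySem.Set.add_of_not_mem hnvis]
      rw [hgs]
      have hncomp : n ∈ comp map c :=
        mem_comp_of_nbr map hc hx ((mem_nbrsL map x n).2 ⟨hncands, hnones⟩)
      have hnd' : (vis ++ [n]).Nodup := by
        rw [List.nodup_append]
        refine ⟨hnd, List.nodup_singleton _, ?_⟩
        intro a ha b hb
        rw [List.mem_singleton] at hb
        subst hb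
        exact fun he => hnvis (he ▸ ha)
      have hones' : ∀ v ∈ vis ++ [n], v ∈ onesB map := by
        intro v hv
        rcases List.mem_append.1 hv with h | h
        · exact hones v h
        · rw [List.mem_singleton] at h; subst h; exact hnones
      have hrv' : ∀ p ∈ n :: rest, p ∈ vis ++ [n] := by
        intro p hp
        rcases List.mem_cons.1 hp with h | h
        · rw [h]; exact List.mem_append_right _ (List.mem_singleton_self n)
        · exact List.mem_append_left _ (hrv p h)
      have hrc' : ∀ p ∈ n :: rest, p ∈ comp map c := by
        intro p hp
        rcases List.mem_cons.1 hp with h | h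
        · subst h; exact hncomp
        · exact hrc p h
      obtain ⟨c1, c2, c3, c4, c5, c6, c7, c8, c9, c10⟩ :=
        ih (vis ++ [n]) (n :: rest) (fun m hm => hL m (List.mem_cons_of_mem _ hm))
          hnd' hones' hrv' hrc'
      refine ⟨c1, c2, ?_, ?_, ?_, c6, c7, ?_, ?_, ?_⟩
      · intro v hv; exact c3 v (List.mem_append_left _ hv)
      · intro v hv
        rcases c4 v hv with h | h
        · rcases List.mem_append.1 h with h' | h'
          · exact Or.inl h'
          · rw [List.mem_singleton] at h'; subst h'; exact Or.inr hncomp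
        · exact Or.inr h
      · intro v hv
        rcases c5 v hv with h | h
        · rcases List.mem_append.1 h with h' | h'
          · exact Or.inl h'
          · rw [List.mem_singleton] at h'
            rw [h']
            exact Or.inr (c8 n List.mem_cons_self)
        · exact Or.inr h
      · intro p hp; exact c8 p (List.mem_cons_of_mem _ hp)
      · intro m hm hmo
        rcases List.mem_cons.1 hm with h | h
        · rw [h]
          exact c3 n (List.mem_append_right _ (List.mem_singleton_self n))
        · exact c9 m h hmo
      · simp only [List.length_append, List.length_cons, List.length_nil] at c10 ⊢
        omega
    · have hgs : gS map (rowN map : Int) (colN map : Int) (vis, rest) n = (vis, rest) := by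
        rw [gS, if_neg hcond]
      rw [hgs]
      obtain ⟨c1, c2, c3, c4, c5, c6, c7, c8, c9, c10⟩ :=
        ih vis rest (fun m hm => hL m (List.mem_cons_of_mem _ hm)) hnd hones hrv hrc
      refine ⟨c1, c2, c3, c4, c5, c6, c7, c8, ?_, c10⟩
      intro m hm hmo
      rcases List.mem_cons.1 hm with h | h
      · subst h
        have hmem : m ∈ vis := by
          by_contra hnv
          have := (mem_onesB map m).1 hmo
          exact hcond ⟨this.1, this.2.1, this.2.2.1, this.2.2.2.1, this.2.2.2.2, hnv⟩
        exact c3 m hmem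
      · exact c9 m h hmo

-- the flood fill, started at a 1-cell c on top of a visited set that is closed under adjacency,
-- visits exactly the old set plus the component of c
lemma flood_spec (map : List (List Int)) :
    ∀ (fuel : Nat) (stack vis : List (Int × Int)) (c : Int × Int),
      c ∈ onesB map →
      vis.Nodup → (∀ v ∈ vis, v ∈ onesB map) →
      (∀ p ∈ stack, p ∈ vis) → (∀ p ∈ stack, p ∈ comp map c) →
      (∀ p ∈ vis, p ∈ stack ∨ ∀ n ∈ nbrsL map p, n ∈ vis) →
      (stack.length + 1 + ((onesB map).length - vis.length) ≤ fuel) →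
      (floodS map (rowN map : Int) (colN map : Int) fuel vis stack).Nodup ∧
      (∀ v ∈ floodS map (rowN map : Int) (colN map : Int) fuel vis stack, v ∈ onesB map) ∧
      (∀ v ∈ vis, v ∈ floodS map (rowN map : Int) (colN map : Int) fuel vis stack) ∧
      (∀ v ∈ floodS map (rowN map : Int) (colN map : Int) fuel vis stack,
        v ∈ vis ∨ v ∈ comp map c) ∧
      (∀ p ∈ floodS map (rowN map : Int) (colN map : Int) fuel vis stack,
        ∀ n ∈ nbrsL map p, n ∈ floodS map (rowN map : Int) (colN map : Int) fuel vis stack) := by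
  intro fuel
  induction fuel with
  | zero =>
    intro stack vis c hc hnd hones hsv hsc hcl hfuel
    omega
  | succ f ih =>
    intro stack vis c hc hnd hones hsv hsc hcl hfuel
    cases stack with
    | nil =>
      rw [show floodS map (rowN map : Int) (colN map : Int) (f + 1) vis [] = vis from rfl]
      refine ⟨hnd, hones, fun v hv => hv, fun v hv => Or.inl hv, ?_⟩
      intro p hp n hn
      rcases hcl p hp with h | h
      · cases h
      · exact h n hn
    | cons hd rest =>
      obtain ⟨ex, ey⟩ := hd
      have hx : ((ex, ey) : Int × Int) ∈ comp map c := hsc _ List.mem_cons_self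
      have hred : floodS map (rowN map : Int) (colN map : Int) (f + 1) vis ((ex, ey) :: rest) =
          floodS map (rowN map : Int) (colN map : Int) f
            ((candsB (ex, ey)).foldl (gS map (rowN map : Int) (colN map : Int)) (vis, rest)).1
            ((candsB (ex, ey)).foldl (gS map (rowN map : Int) (colN map : Int)) (vis, rest)).2 := rfl
      rw [hred]
      obtain ⟨c1, c2, c3, c4, c5, c6, c7, c8, c9, c10⟩ :=
        gS_fold map hc hx (candsB (ex, ey)) vis rest (fun n hn => hn) hnd hones
          (fun p hp => hsv p (List.mem_cons_of_mem _ hp))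
          (fun p hp => hsc p (List.mem_cons_of_mem _ hp))
      set S := (candsB (ex, ey)).foldl (gS map (rowN map : Int) (colN map : Int)) (vis, rest)
        with hS
      have hcl' : ∀ p ∈ S.1, p ∈ S.2 ∨ ∀ n ∈ nbrsL map p, n ∈ S.1 := by
        intro p hp
        rcases c5 p hp with hpv | hps
        · rcases hcl p hpv with h | h
          · rcases List.mem_cons.1 h with h' | h'
            · right
              intro n hn
              rw [h'] at hn
              have hmm := (mem_nbrsL map (ex, ey) n).1 hn
              exact c9 n hmm.1 hmm.2
            · exact Or.inl (c8 p h')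
          · right
            intro n hn
            exact c3 n (h n hn)
        · exact Or.inl hps
      have hlen1 : vis.length ≤ S.1.length := nodup_subset_length hnd c3
      have hlen2 : S.1.length ≤ (onesB map).length := nodup_subset_length c1 c2
      have hfuel' : S.2.length + 1 + ((onesB map).length - S.1.length) ≤ f := by
        simp only [List.length_cons] at hfuel
        omega
      obtain ⟨r1, r2, r3, r4, r5⟩ := ih S.2 S.1 c hc c1 c2 c6 c7 hcl' hfuel'
      refine ⟨r1, r2, ?_, ?_, r5⟩
      · intro v hv; exact r3 v (c3 v hv)
      · intro v hv
        rcases r4 v hv with h | h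
        · exact c4 v h
        · exact Or.inr h

-- invariant of the outer raster scan
def OutInv (map : List (List Int)) (P : List (Int × Int))
    (s : PySem.Set (Int × Int) × List Int) : Prop :=
  s.1.Nodup ∧ (∀ v ∈ s.1, v ∈ onesB map) ∧
  s.1.toFinset = ((P.filter (onesPred map)).toFinset).biUnion (comp map) ∧
  s.2 = (P.filter (fun c => onesPred map c && isMinB map c)).map
    (fun c => ((comp map c).card : Int))

lemma mem_onesB_of_filterP (map : List (List Int)) {P L : List (Int × Int)}
    (hsplit : rasterL map = P ++ L) {d : Int × Int} (hd : d ∈ P.filter (onesPred map)) :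
    d ∈ onesB map := by
  have hdfil := List.mem_filter.1 hd
  have hdraster : d ∈ rasterL map := by
    rw [hsplit]; exact List.mem_append_left _ hdfil.1
  have hb := (mem_rasterL map d).1 hdraster
  have hdcell : pyCell map d.1 d.2 = 1 := by simpa [onesPred] using hdfil.2
  exact (mem_onesB map d).2 ⟨hb.1, hb.2.1, hb.2.2.1, hb.2.2.2, hdcell⟩

lemma idx_lt_of_prefix (map : List (List Int)) {P L : List (Int × Int)} {c d : Int × Int}
    (hsplit : rasterL map = P ++ c :: L) (hd : d ∈ P) : idxC map d < idxC map c := by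
  have hpw := pairwise_rasterL map
  rw [hsplit] at hpw
  exact (List.pairwise_append.1 hpw).2.2 d hd c List.mem_cons_self

lemma idx_lt_of_suffix (map : List (List Int)) {P L : List (Int × Int)} {c m : Int × Int}
    (hsplit : rasterL map = P ++ c :: L) (hm : m ∈ L) : idxC map c < idxC map m := by
  have hpw := pairwise_rasterL map
  rw [hsplit] at hpw
  have hcs := (List.pairwise_append.1 hpw).2.1
  exact (List.pairwise_cons.1 hcs).1 m hm

lemma raster_step (map : List (List Int)) (P L : List (Int × Int)) (c : Int × Int)
    (hsplit : rasterL map = P ++ c :: L) (s : PySem.Set (Int × Int) × List Int)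
    (h : OutInv map P s) : OutInv map (P ++ [c]) (phi map s c) := by
  obtain ⟨hnd, hones, hvisF, hsizes⟩ := h
  have hcraster : c ∈ rasterL map := by
    rw [hsplit]; exact List.mem_append_right _ List.mem_cons_self
  have hcb := (mem_rasterL map c).1 hcraster
  by_cases hcell : pyCell map c.1 c.2 = 1
  · have hcones : c ∈ onesB map :=
      (mem_onesB map c).2 ⟨hcb.1, hcb.2.1, hcb.2.2.1, hcb.2.2.2, hcell⟩
    have hpred : onesPred map c = true := by simp [onesPred, hcell]
    have hfilt1 : (P ++ [c]).filter (onesPred map) = P.filter (onesPred map) ++ [c] := by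
      rw [List.filter_append]; simp [hpred]
    by_cases hmem : c ∈ s.1
    · -- already visited: its component was flooded from an earlier seed; c is not minimal
      have hphi : phi map s c = s := by
        rw [phi, if_neg]; rintro ⟨-, h2⟩; exact h2 hmem
      rw [hphi]
      have hcF : c ∈ s.1.toFinset := List.mem_toFinset.2 hmem
      rw [hvisF] at hcF
      obtain ⟨d, hdP, hcd⟩ := Finset.mem_biUnion.1 hcF
      have hdones : d ∈ onesB map :=
        mem_onesB_of_filterP map hsplit (List.mem_toFinset.1 hdP)
      have hdcomp : d ∈ comp map c := ball_symm map (NN map) hdones hcd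
      refine ⟨hnd, hones, ?_, ?_⟩
      · rw [hfilt1, List.toFinset_append, Finset.union_biUnion, hvisF]
        apply Finset.Subset.antisymm
        · exact Finset.subset_union_left
        · apply Finset.union_subset subset_rfl
          intro y hy
          obtain ⟨e, he, hye⟩ := Finset.mem_biUnion.1 hy
          simp only [List.toFinset_cons, List.toFinset_nil, insert_empty_eq,
            Finset.mem_singleton] at he
          rw [he] at hye
          have hyd : y ∈ comp map d := by
            rw [← comp_eq_of_mem map hdones hcd]
            exact hye
          exact Finset.mem_biUnion.2 ⟨d, hdP, hyd⟩
      · rw [List.filter_append, hsizes]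
        have hnotmin : isMinB map c = false := by
          simp only [isMinB, decide_eq_false_iff_not]
          have h1 := minIdx_le map hdcomp
          have h2 := idx_lt_of_prefix map hsplit (List.mem_filter.1 (List.mem_toFinset.1 hdP)).1
          omega
        simp [hnotmin]
    · -- a fresh component: flood it and record its size
      have hphi : phi map s c =
          (floodS map (rowN map : Int) (colN map : Int) (NN map + 1) (PySem.Set.add s.1 c) [c],
           s.2 ++ [((floodS map (rowN map : Int) (colN map : Int) (NN map + 1)
             (PySem.Set.add s.1 c) [c]).length : Int) - (s.1.length : Int)]) := by
        rw [phi, if_pos ⟨hcell, hmem⟩]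
      rw [hphi]
      have hvadd : PySem.Set.add s.1 c = s.1 ++ [c] := PySem.Set.add_of_not_mem hmem
      have hnd' : (PySem.Set.add s.1 c).Nodup := by
        rw [hvadd, List.nodup_append]
        refine ⟨hnd, List.nodup_singleton _, ?_⟩
        intro a ha b hb
        rw [List.mem_singleton] at hb
        subst hb
        exact fun he => hmem (he ▸ ha)
      have hones' : ∀ v ∈ PySem.Set.add s.1 c, v ∈ onesB map := by
        intro v hv
        rw [hvadd] at hv
        rcases List.mem_append.1 hv with h | h
        · exact hones v h
        · rw [List.mem_singleton] at h; subst h; exact hcones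
      have hstackv : ∀ p ∈ [c], p ∈ PySem.Set.add s.1 c := by
        intro p hp
        rw [List.mem_singleton] at hp
        rw [hp, hvadd]
        exact List.mem_append_right _ (List.mem_singleton_self c)
      have hstackc : ∀ p ∈ [c], p ∈ comp map c := by
        intro p hp
        rw [List.mem_singleton] at hp
        rw [hp]
        exact mem_comp_self map c
      have hclosed : ∀ p ∈ PySem.Set.add s.1 c,
          p ∈ [c] ∨ ∀ n ∈ nbrsL map p, n ∈ PySem.Set.add s.1 c := by
        intro p hp
        rw [hvadd] at hp
        rcases List.mem_append.1 hp with hpv | hpc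
        · right
          intro n hn
          have hpF : p ∈ s.1.toFinset := List.mem_toFinset.2 hpv
          rw [hvisF] at hpF
          obtain ⟨d, hdP, hpd⟩ := Finset.mem_biUnion.1 hpF
          have hdones : d ∈ onesB map :=
            mem_onesB_of_filterP map hsplit (List.mem_toFinset.1 hdP)
          have hnd2 : n ∈ comp map d := mem_comp_of_nbr map hdones hpd hn
          have hns : n ∈ s.1.toFinset := by
            rw [hvisF]; exact Finset.mem_biUnion.2 ⟨d, hdP, hnd2⟩
          rw [hvadd]
          exact List.mem_append_left _ (List.mem_toFinset.1 hns)
        · exact Or.inl hpc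
      have hfuel : ([c] : List (Int × Int)).length + 1 +
          ((onesB map).length - (PySem.Set.add s.1 c).length) ≤ NN map + 1 := by
        have hN := length_onesB_le map
        have hsub := nodup_subset_length hnd' hones'
        have hlen : (PySem.Set.add s.1 c).length = s.1.length + 1 := by
          rw [hvadd]; simp
        rw [hlen] at hsub
        simp only [List.length_cons, List.length_nil, hlen]
        omega
      obtain ⟨f1, f2, f3, f4, f5⟩ :=
        flood_spec map (NN map + 1) [c] (PySem.Set.add s.1 c) c hcones hnd' hones'
          hstackv hstackc hclosed hfuel
      set V := floodS map (rowN map : Int) (colN map : Int) (NN map + 1)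
        (PySem.Set.add s.1 c) [c] with hV
      have hcinV : c ∈ V := f3 c (by
        rw [hvadd]; exact List.mem_append_right _ (List.mem_singleton_self c))
      have hVF : V.toFinset = s.1.toFinset ∪ comp map c := by
        apply Finset.Subset.antisymm
        · intro v hv
          rcases f4 v (List.mem_toFinset.1 hv) with h | h
          · rw [hvadd] at h
            rcases List.mem_append.1 h with h' | h'
            · exact Finset.mem_union_left _ (List.mem_toFinset.2 h')
            · rw [List.mem_singleton] at h'
              subst h'
              exact Finset.mem_union_right _ (mem_comp_self map v)
          · exact Finset.mem_union_right _ h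
        · apply Finset.union_subset
          · intro v hv
            exact List.mem_toFinset.2 (f3 v (by
              rw [hvadd]; exact List.mem_append_left _ (List.mem_toFinset.1 hv)))
          · have hclosedV : Fst map V.toFinset ⊆ V.toFinset := by
              intro y hy
              simp only [Fst, Finset.mem_union] at hy
              rcases hy with hy | hy
              · exact hy
              · obtain ⟨p, hpV, hyn⟩ := Finset.mem_biUnion.1 hy
                rw [nbrsF, List.mem_toFinset] at hyn
                exact List.mem_toFinset.2 (f5 p (List.mem_toFinset.1 hpV) y hyn)
            exact closed_iterF_subset map hclosedV (NN map)
              (Finset.singleton_subset_iff.2 (List.mem_toFinset.2 hcinV))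
      have hdisj : Disjoint s.1.toFinset (comp map c) := by
        rw [Finset.disjoint_left]
        intro a ha hac
        rw [hvisF] at ha
        obtain ⟨d, hdP, had⟩ := Finset.mem_biUnion.1 ha
        have hdones : d ∈ onesB map :=
          mem_onesB_of_filterP map hsplit (List.mem_toFinset.1 hdP)
        have h1 : comp map a = comp map c := comp_eq_of_mem map hcones hac
        have h2 : comp map a = comp map d := comp_eq_of_mem map hdones had
        have hcd : c ∈ comp map d := by
          rw [← h2, h1]; exact mem_comp_self map c
        have : c ∈ s.1.toFinset := by
          rw [hvisF]; exact Finset.mem_biUnion.2 ⟨d, hdP, hcd⟩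
        exact hmem (List.mem_toFinset.1 this)
      have hlenV : (V.length : Int) - (s.1.length : Int) = ((comp map c).card : Int) := by
        have hc1 : V.length = V.toFinset.card := (List.toFinset_card_of_nodup f1).symm
        have hc2 : s.1.length = s.1.toFinset.card := (List.toFinset_card_of_nodup hnd).symm
        rw [hc1, hc2, hVF, Finset.card_union_of_disjoint hdisj]
        push_cast
        ring
      have hminc : isMinB map c = true := by
        simp only [isMinB, decide_eq_true_eq]
        have hle := minIdx_le map (mem_comp_self map c)
        obtain ⟨m, hmcomp, hmidx⟩ := minIdx_mem map
          (⟨c, mem_comp_self map c⟩ : (comp map c).Nonempty)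
        by_contra hne
        have hlt : idxC map m < idxC map c := by omega
        have hmones := mem_onesB_of_mem_comp map hcones hmcomp
        have hmraster : m ∈ rasterL map := by
          have hb := (mem_onesB map m).1 hmones
          exact (mem_rasterL map m).2 ⟨hb.1, hb.2.1, hb.2.2.1, hb.2.2.2.1⟩
        rw [hsplit] at hmraster
        rcases List.mem_append.1 hmraster with hmP | hmCL
        · have hcm : c ∈ comp map m := ball_symm map (NN map) hcones hmcomp
          have hmcell : pyCell map m.1 m.2 = 1 := ((mem_onesB map m).1 hmones).2.2.2.2
          have hmfil : m ∈ P.filter (onesPred map) :=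
            List.mem_filter.2 ⟨hmP, by simp [onesPred, hmcell]⟩
          have : c ∈ s.1.toFinset := by
            rw [hvisF]
            exact Finset.mem_biUnion.2 ⟨m, List.mem_toFinset.2 hmfil, hcm⟩
          exact hmem (List.mem_toFinset.1 this)
        · rcases List.mem_cons.1 hmCL with h' | h'
          · rw [h'] at hlt; omega
          · have := idx_lt_of_suffix map hsplit h'
            omega
      refine ⟨f1, f2, ?_, ?_⟩
      · rw [hfilt1, List.toFinset_append, Finset.union_biUnion, hVF, hvisF]
        congr 1
        simp
      · rw [List.filter_append, List.map_append, hsizes]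
        simp only [List.filter_cons, List.filter_nil, hpred, hminc, Bool.and_self, if_pos]
        rw [List.map_cons, List.map_nil]
        rw [hlenV]
  · have hpred : onesPred map c = false := by simp [onesPred, hcell]
    have hphi : phi map s c = s := by
      rw [phi, if_neg]; rintro ⟨h1, -⟩; exact hcell h1
    rw [hphi]
    refine ⟨hnd, hones, ?_, ?_⟩
    · rw [List.filter_append, hvisF]
      simp [hpred]
    · rw [List.filter_append, hsizes]
      simp [hpred]

lemma raster_fold (map : List (List Int)) :
    ∀ (L P : List (Int × Int)), rasterL map = P ++ L →
      ∀ s, OutInv map P s → OutInv map (P ++ L) (L.foldl (phi map) s) := by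
  intro L
  induction L with
  | nil =>
    intro P h s hs
    simpa using hs
  | cons c t ih =>
    intro P h s hs
    rw [List.foldl_cons]
    have hstep : OutInv map (P ++ [c]) (phi map s c) := raster_step map P t c h s hs
    have hassoc : rasterL map = (P ++ [c]) ++ t := by
      rw [h, List.append_assoc]; rfl
    have hres := ih (P ++ [c]) hassoc (phi map s c) hstep
    rw [List.append_assoc] at hres
    simpa using hres

lemma solutionSet_eq_sizes (map : List (List Int)) :
    solutionSet map = (((sizesL map).length : Int), PySem.List.maxD (sizesL map) (fun x => x) 0) := by
  have h0 : OutInv map [] (PySem.Set.empty, ([] : List Int)) := by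
    refine ⟨List.nodup_nil, by simp [PySem.Set.empty], ?_, by simp⟩
    simp [PySem.Set.empty]
  have hres := raster_fold map (rasterL map) [] rfl _ h0
  obtain ⟨-, -, -, hsz⟩ := hres
  simp only [List.nil_append] at hsz
  have hB : solutionSet map =
      (((outerS map).2.length : Int), PySem.List.maxD (outerS map).2 (fun x => x) 0) := rfl
  rw [hB, outerS_eq_raster map, hsz]
  have hlist : (rasterL map).filter (fun c => onesPred map c && isMinB map c) = minCells map := by
    rw [minCells, onesB_eq_filter_raster, List.filter_filter]
    exact List.filter_congr (fun a _ => by rw [Bool.and_comm])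
  rw [hlist]
  rfl

-- ---------- B-side: distinct labels and their multiplicities ----------
lemma roots_aux (map : List (List Int)) :
    ∀ (L S : List (Int × Int)), onesB map = L ++ S →
      PySem.Set.ofList (L.map (mfun map)) = (L.filter (isMinB map)).map (idxC map) := by
  intro L
  induction L using List.reverseRecOn with
  | nil => intro S h; rfl
  | append_singleton L' c ih =>
    intro S h
    have hsplit : onesB map = L' ++ (c :: S) := by simpa using h
    have hcmem : c ∈ onesB map := by
      rw [hsplit]; exact List.mem_append_right _ List.mem_cons_self
    have hrec := ih (c :: S) hsplit
    rw [List.map_append, List.map_singleton, PySem.Set.ofList_append_singleton, hrec,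
      List.filter_append]
    by_cases hmin : isMinB map c = true
    · have hmc : mfun map c = idxC map c := by
        simp only [isMinB, decide_eq_true_eq] at hmin
        exact hmin.symm
      have hnotmem : mfun map c ∉ (L'.filter (isMinB map)).map (idxC map) := by
        intro hmem
        obtain ⟨d, hd, hdix⟩ := List.mem_map.1 hmem
        have hdL' : d ∈ L' := (List.mem_filter.1 hd).1
        have hdones : d ∈ onesB map := by rw [hsplit]; exact List.mem_append_left _ hdL'
        have hdc : d = c := idxC_inj map hdones hcmem (by rw [hdix, hmc])
        subst hdc
        have hnd := nodup_onesB map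
        rw [hsplit] at hnd
        exact (List.disjoint_of_nodup_append hnd) hdL' List.mem_cons_self
      rw [PySem.Set.add_of_not_mem hnotmem]
      simp [hmin, hmc]
    · have hne : (comp map c).Nonempty := ⟨c, mem_comp_self map c⟩
      obtain ⟨m, hmcomp, hmidx⟩ := minIdx_mem map hne
      have hmones : m ∈ onesB map := mem_onesB_of_mem_comp map hcmem hmcomp
      have hmlt : idxC map m < idxC map c := by
        have hle := minIdx_le map (mem_comp_self map c)
        simp only [isMinB, decide_eq_true_eq] at hmin
        omega
      have hmL' : m ∈ L' := by
        have hm2 : m ∈ L' ++ (c :: S) := by rw [← hsplit]; exact hmones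
        rcases List.mem_append.1 hm2 with h' | h'
        · exact h'
        · exfalso
          rcases List.mem_cons.1 h' with rfl | hS
          · omega
          · have hpw := pairwise_onesB map
            rw [hsplit] at hpw
            have hcs := (List.pairwise_append.1 hpw).2.1
            have hlt := (List.pairwise_cons.1 hcs).1 m hS
            omega
      have hminm : isMinB map m = true := by
        simp only [isMinB, decide_eq_true_eq]
        rw [comp_eq_of_mem map hcmem hmcomp]
        omega
      have hmem : mfun map c ∈ (L'.filter (isMinB map)).map (idxC map) :=
        List.mem_map.2 ⟨m, List.mem_filter.2 ⟨hmL', hminm⟩, by rw [hmidx]; rfl⟩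
      rw [PySem.Set.add_of_mem hmem]
      simp [hmin]

lemma roots_eq (map : List (List Int)) :
    PySem.Set.ofList ((onesB map).map (mfun map)) = (minCells map).map (idxC map) :=
  roots_aux map (onesB map) [] (by simp)

lemma count_values (map : List (List Int)) {m : Int × Int} (hm : m ∈ minCells map) :
    ((onesB map).map (mfun map)).count (idxC map m) = (comp map m).card := by
  have hmones : m ∈ onesB map := (List.mem_filter.1 hm).1
  have hmmin : idxC map m = minIdx map (comp map m) := by
    have h2 := (List.mem_filter.1 hm).2
    simpa [isMinB] using h2
  have h1 : ((onesB map).map (mfun map)).count (idxC map m)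
      = (onesB map).countP (fun c => decide (mfun map c = idxC map m)) := by
    rw [List.count_eq_countP, List.countP_map]
    rfl
  have h2 : (onesB map).countP (fun c => decide (mfun map c = idxC map m))
      = (onesB map).countP (fun c => decide (c ∈ comp map m)) := by
    apply List.countP_congr
    intro c hc
    have hiff : mfun map c = idxC map m ↔ c ∈ comp map m := by
      constructor
      · intro he
        obtain ⟨m', hm'comp, hm'idx⟩ := minIdx_mem map
          (⟨c, mem_comp_self map c⟩ : (comp map c).Nonempty)
        have hm'ones : m' ∈ onesB map := mem_onesB_of_mem_comp map hc hm'comp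
        have hm'm : m' = m := idxC_inj map hm'ones hmones (by rw [hm'idx]; exact he)
        subst hm'm
        exact ball_symm map (NN map) hc hm'comp
      · intro hcm
        have hcc : comp map c = comp map m := comp_eq_of_mem map hmones hcm
        show minIdx map (comp map c) = idxC map m
        rw [hcc, ← hmmin]
    simp only [decide_eq_true_eq]
    exact hiff
  have h3 : (onesB map).countP (fun c => decide (c ∈ comp map m)) = (comp map m).card := by
    rw [List.countP_eq_length_filter]
    have hnodup : ((onesB map).filter (fun c => decide (c ∈ comp map m))).Nodup :=
      (nodup_onesB map).filter _
    rw [← List.toFinset_card_of_nodup hnodup]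
    congr 1
    ext x
    simp only [List.mem_toFinset, List.mem_filter, decide_eq_true_eq]
    constructor
    · rintro ⟨-, h⟩; exact h
    · intro h; exact ⟨mem_onesB_of_mem_comp map hmones h, h⟩
  rw [h1, h2, h3]

lemma solution_alt_eq_sizes (map : List (List Int)) :
    solution_alt map = (((sizesL map).length : Int), PySem.List.maxD (sizesL map) (fun x => x) 0) := by
  have hvals := values_final map
  simp only [solution_alt]
  rw [hvals, roots_eq, List.map_map]
  have hlen : (minCells map).length = (sizesL map).length := by simp [sizesL]
  have hlist : (minCells map).map
      ((fun r => ((((onesB map).map (mfun map)).count r : Nat) : Int)) ∘ idxC map) = sizesL map := by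
    unfold sizesL
    refine List.map_congr_left (fun m hm => ?_)
    simp only [Function.comp_apply]
    rw [count_values map hm]
  rw [hlist]
  congr 1
  rw [List.length_map, hlen]

-- ===== VERDICT (by name: the statement is the Claim_ definition above) =====
theorem solution_spec : Claim_equal_solution := by
  intro map _ _
  unfold Spec_solution
  rw [solution_eq_set, solutionSet_eq_sizes, solution_alt_eq_sizes]
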